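-- pv_equiv track=rewrite | github.com/dudduss/170-garg-sack | sample_solver.py | constraint_checker
-- ===== SOURCE A (Python) =====
-- def constraint_checker (output, item, constraints):
--   item_class = item[1]
--   for constraint in constraints:
--     if item_class in constraint:
--       for val in output:
--         if val[1] in constraint:
--           return False
--   return True
-- ===== SOURCE B (Python) =====
-- def constraint_checker(output, item, constraints):
--     # Stage 1: merge every constraint that contains the item's class
--     # into one forbidden-class set.
--     forbidden = set()
--     for constraint in constraints:
--         if item[1] in constraint:
--             forbidden.update(constraint)
--     # Stage 2: one pass over output against the merged set.
--     return all(v[1] not in forbidden for v in output)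
-- ===== Notes on version B (the rewrite author's own statement) =====
-- stated objective: alternative
-- what changed: B inverts A's loop nesting: it first folds all constraints containing the item's class into one merged forbidden-class set, then makes a single pass over output checking membership in that merged set, instead of A's outer constraint loop with an inner rescan of output and early return.
import Mathlib
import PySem

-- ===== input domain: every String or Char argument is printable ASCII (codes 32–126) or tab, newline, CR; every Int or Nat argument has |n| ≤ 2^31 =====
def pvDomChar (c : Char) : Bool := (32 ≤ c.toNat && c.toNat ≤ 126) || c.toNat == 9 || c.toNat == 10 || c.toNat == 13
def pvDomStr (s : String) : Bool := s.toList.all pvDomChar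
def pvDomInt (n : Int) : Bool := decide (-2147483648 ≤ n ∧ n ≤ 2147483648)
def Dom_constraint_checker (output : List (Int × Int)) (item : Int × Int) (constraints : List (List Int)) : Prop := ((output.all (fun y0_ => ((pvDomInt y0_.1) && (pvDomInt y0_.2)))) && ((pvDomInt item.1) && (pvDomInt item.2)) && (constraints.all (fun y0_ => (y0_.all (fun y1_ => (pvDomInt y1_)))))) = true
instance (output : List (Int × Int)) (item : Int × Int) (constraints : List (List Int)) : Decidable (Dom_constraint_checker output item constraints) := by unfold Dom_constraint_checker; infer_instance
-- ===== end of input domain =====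

-- B inverts A's loop nesting: it first merges all constraints containing the item's class
-- into one forbidden set, then checks output once against that set (objective: alternative).
-- ===== PORT A =====
-- inner 'for val in output' loop: true iff some val[1] lies in constraint (→ return False)
def ccA_inner (output : List (Int × Int)) (c : List Int) : Bool :=
  match output with
  | [] => false
  | v :: rest => if v.2 ∈ c then true else ccA_inner rest c

def ccA_loop (output : List (Int × Int)) (item_class : Int) (constraints : List (List Int)) : Bool :=
  match constraints with
  | [] => true
  | c :: rest =>
    if item_class ∈ c then
      if ccA_inner output c then false else ccA_loop output item_class rest
    else ccA_loop output item_class rest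

def constraint_checker (output : List (Int × Int)) (item : Int × Int) (constraints : List (List Int)) : Bool :=
  ccA_loop output item.2 constraints

-- ===== PORT B =====
-- Stage 1 of Source B: fold the qualifying constraints into one forbidden set
def ccB_forbidden (item_class : Int) (constraints : List (List Int)) : PySem.Set Int :=
  constraints.foldl (fun s c => if item_class ∈ c then PySem.Set.update s c else s) PySem.Set.empty

def constraint_checker_alt (output : List (Int × Int)) (item : Int × Int) (constraints : List (List Int)) : Bool :=
  output.all (fun v => !(decide (v.2 ∈ ccB_forbidden item.2 constraints)))

-- ===== PRECONDITION & SPEC =====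
def Spec_constraint_checker (output : List (Int × Int)) (item : Int × Int) (constraints : List (List Int)) (out : Bool) : Prop := out = constraint_checker_alt output item constraints
instance (output : List (Int × Int)) (item : Int × Int) (constraints : List (List Int)) (out : Bool) : Decidable (Spec_constraint_checker output item constraints out) := by unfold Spec_constraint_checker; infer_instance

-- ===== CLAIM =====
def Claim_equal_constraint_checker : Prop := ∀ (output : List (Int × Int)) (item : Int × Int) (constraints : List (List Int)), Dom_constraint_checker output item constraints → Spec_constraint_checker output item constraints (constraint_checker output item constraints)

-- ===== LEMMAS AND PROOFS =====
theorem foldl_forbidden_mem (item_class x : Int) (constraints : List (List Int)) (s : PySem.Set Int) :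
    x ∈ constraints.foldl (fun s c => if item_class ∈ c then PySem.Set.update s c else s) s
      ↔ x ∈ s ∨ ∃ c ∈ constraints, item_class ∈ c ∧ x ∈ c := by
  induction constraints generalizing s with
  | nil => simp
  | cons c rest ih =>
    by_cases hc : item_class ∈ c
    · simp [hc, ih, PySem.Set.mem_update]; tauto
    · simp [hc, ih]

theorem mem_ccB_forbidden (item_class x : Int) (constraints : List (List Int)) :
    x ∈ ccB_forbidden item_class constraints ↔ ∃ c ∈ constraints, item_class ∈ c ∧ x ∈ c := by
  unfold ccB_forbidden
  rw [foldl_forbidden_mem]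
  simp [PySem.Set.empty]

theorem ccA_inner_iff (output : List (Int × Int)) (c : List Int) :
    ccA_inner output c = true ↔ ∃ v ∈ output, v.2 ∈ c := by
  induction output with
  | nil => simp [ccA_inner]
  | cons v rest ih => by_cases hv : v.2 ∈ c <;> simp [ccA_inner, hv, ih]

theorem ccA_loop_iff (output : List (Int × Int)) (item_class : Int) (constraints : List (List Int)) :
    ccA_loop output item_class constraints = false
      ↔ ∃ c ∈ constraints, item_class ∈ c ∧ ∃ v ∈ output, v.2 ∈ c := by
  induction constraints with
  | nil => simp [ccA_loop]
  | cons c rest ih =>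
    by_cases hc : item_class ∈ c
    · by_cases hi : ccA_inner output c = true
      · have hstep : ccA_loop output item_class (c :: rest) = false := by
          simp [ccA_loop, hc, hi]
        rw [hstep]
        exact ⟨fun _ => ⟨c, List.mem_cons_self, hc, (ccA_inner_iff _ _).mp hi⟩, fun _ => rfl⟩
      · have hno : ¬ ∃ v ∈ output, v.2 ∈ c := fun h => hi ((ccA_inner_iff _ _).mpr h)
        have hstep : ccA_loop output item_class (c :: rest) = ccA_loop output item_class rest := by
          simp [ccA_loop, hc, hi]
        rw [hstep, ih]
        constructor
        · rintro ⟨c', hc', h⟩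
          exact ⟨c', List.mem_cons_of_mem _ hc', h⟩
        · rintro ⟨c', hc', hic', hv⟩
          rcases List.mem_cons.mp hc' with rfl | hm
          · exact absurd hv hno
          · exact ⟨c', hm, hic', hv⟩
    · have hstep : ccA_loop output item_class (c :: rest) = ccA_loop output item_class rest := by
        simp [ccA_loop, hc]
      rw [hstep, ih]
      constructor
      · rintro ⟨c', hc', h⟩
        exact ⟨c', List.mem_cons_of_mem _ hc', h⟩
      · rintro ⟨c', hc', hic', hv⟩
        rcases List.mem_cons.mp hc' with rfl | hm
        · exact absurd hic' hc
        · exact ⟨c', hm, hic', hv⟩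

theorem alt_iff (output : List (Int × Int)) (item : Int × Int) (constraints : List (List Int)) :
    constraint_checker_alt output item constraints = false
      ↔ ∃ v ∈ output, ∃ c ∈ constraints, item.2 ∈ c ∧ v.2 ∈ c := by
  simp [constraint_checker_alt, mem_ccB_forbidden]

-- ===== VERDICT =====
theorem constraint_checker_spec : Claim_equal_constraint_checker := by
  intro output item constraints _
  unfold Spec_constraint_checker
  cases hA : constraint_checker output item constraints with
  | false =>
    obtain ⟨c, hc, hic, v, hv, hvc⟩ := (ccA_loop_iff output item.2 constraints).mp hA
    exact ((alt_iff output item constraints).mpr ⟨v, hv, c, hc, hic, hvc⟩).symm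
  | true =>
    by_contra h
    have hB : constraint_checker_alt output item constraints = false := by
      cases hB : constraint_checker_alt output item constraints
      · rfl
      · exact absurd hB.symm (by simpa [hA] using h)
    obtain ⟨v, hv, c, hc, hic, hvc⟩ := (alt_iff output item constraints).mp hB
    have := (ccA_loop_iff output item.2 constraints).mpr ⟨c, hc, hic, v, hv, hvc⟩
    simp [constraint_checker, this] at hA
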